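-- pv_equiv track=rewrite | github.com/biowpn/MinimalCFG | mincfg/mincfg.py | reverse_closure
-- ===== SOURCE A (Python) =====
-- def reverse_closure(G, s):
--     '''
--     get the set of nonterminals that may derive symbol `s` via some short rules
--     '''
--     nt_s = {s}
--     done = False
--     while not done:
--         done = True
--         for nt, subs in G:
--             if len(subs) == 1 and subs[0] in nt_s and nt not in nt_s:
--                 nt_s.add(nt)
--                 done = False
--     nt_s.remove(s)
--     return nt_s
-- ===== SOURCE B (Python) =====
-- def reverse_closure(G, s):
--     '''
--     get the set of nonterminals that may derive symbol `s` via some short rules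
--     '''
--     # reverse unit-rule graph (rhs -> list of lhs), then BFS from s
--     radj = {}
--     for nt, subs in G:
--         if len(subs) == 1:
--             radj.setdefault(subs[0], []).append(nt)
--     seen = {s}
--     frontier = [s]
--     while frontier:
--         next_frontier = []
--         for x in frontier:
--             for nt in radj.get(x, []):
--                 if nt not in seen:
--                     seen.add(nt)
--                     next_frontier.append(nt)
--         frontier = next_frontier
--     seen.remove(s)
--     return seen
-- ===== Notes on version B (the rewrite author's own statement) =====
-- stated objective: alternative
-- what changed: A runs a fixed-point loop rescanning the whole grammar until no new nonterminal appears; B builds the reverse unit-rule adjacency map once and does a breadth-first search from s, so each unit rule is discovered by graph traversal instead of repeated grammar sweeps.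
import Mathlib
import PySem

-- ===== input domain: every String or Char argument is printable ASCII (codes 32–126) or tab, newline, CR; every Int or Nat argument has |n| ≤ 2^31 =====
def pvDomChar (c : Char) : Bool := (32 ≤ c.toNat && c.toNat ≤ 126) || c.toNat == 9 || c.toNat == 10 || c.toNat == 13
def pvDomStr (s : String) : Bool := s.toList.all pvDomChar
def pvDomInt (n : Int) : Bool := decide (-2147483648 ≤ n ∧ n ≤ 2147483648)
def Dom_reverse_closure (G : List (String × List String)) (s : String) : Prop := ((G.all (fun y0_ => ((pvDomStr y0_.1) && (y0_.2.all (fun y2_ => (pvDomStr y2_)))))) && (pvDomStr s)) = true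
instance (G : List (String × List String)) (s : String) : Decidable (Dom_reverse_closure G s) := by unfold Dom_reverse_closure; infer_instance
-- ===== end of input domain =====

-- B replaces A's fixed-point loop that rescans the whole grammar until nothing changes
-- by a reverse unit-rule adjacency dict built once plus a breadth-first search from s.
-- Both Pythons return a SET (Python sets have no modelled iteration order); both ports
-- return the set's elements in sorted order — set outputs are compared as finite sets.

-- ===== PORT A =====
-- one step of A's inner 'for nt, subs in G' loop; state = (nt_s, done)
def rcSweepA (st : PySem.Set String × Bool) (rule : String × List String) : PySem.Set String × Bool :=
  if rule.2.length = 1 ∧ PySem.Set.contains st.1 (PySem.List.pyGetD rule.2 0 "") = true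
       ∧ PySem.Set.contains st.1 rule.1 = false
  then (PySem.Set.add st.1 rule.1, false) else st

-- termination helper (cited by both loops' decreasing_by): a strictly-smaller count
theorem countP_strict {α : Type} (p q : α → Bool) (l : List α) (himp : ∀ x, p x = true → q x = true)
    (a : α) (ha : a ∈ l) (hpa : p a = false) (hqa : q a = true) : l.countP p < l.countP q := by
  induction l with
  | nil => cases ha
  | cons b l ih =>
    rw [List.countP_cons, List.countP_cons]
    have hm : l.countP p ≤ l.countP q := List.countP_mono_left (fun x _ => himp x)
    rcases List.mem_cons.mp ha with rfl | ha'
    · simp [hpa, hqa]; omega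
    · have := ih ha'
      cases hpb : p b
      · cases hqb : q b <;> simp <;> omega
      · have := himp b hpb; simp [this]; omega

-- the sweep only appends new left-hand sides; the done-flag clears iff something was added
-- (needed by rcLoopA's termination and by the proofs below)
theorem sweepA_grow (G : List (String × List String)) :
    ∀ (S : PySem.Set String) (d : Bool),
    ∃ ex, G.foldl rcSweepA (S, d) = (S ++ ex, d && ex.isEmpty)
      ∧ ∀ a ∈ ex, a ∈ G.map Prod.fst ∧ a ∉ S := by
  induction G with
  | nil => intro S d; exact ⟨[], by simp, by simp⟩
  | cons r G ih =>
    intro S d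
    by_cases hc : r.2.length = 1 ∧ PySem.Set.contains S (PySem.List.pyGetD r.2 0 "") = true
        ∧ PySem.Set.contains S r.1 = false
    · have hnm : r.1 ∉ S := by
        intro hm
        have := (PySem.Set.contains_iff S r.1).mpr hm
        rw [hc.2.2] at this; cases this
      obtain ⟨ex, heq, hmem⟩ := ih (PySem.Set.add S r.1) false
      rw [PySem.Set.add_of_not_mem hnm] at heq hmem
      refine ⟨r.1 :: ex, ?_, ?_⟩
      · simp only [List.foldl_cons, rcSweepA, if_pos hc, PySem.Set.add_of_not_mem hnm, heq]
        rw [List.append_cons]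
        simp
      · intro a ha
        rcases List.mem_cons.mp ha with rfl | ha'
        · exact ⟨by simp, hnm⟩
        · obtain ⟨h1, h2⟩ := hmem a ha'
          exact ⟨by simp [h1], fun hx => h2 (List.mem_append_left _ hx)⟩
    · obtain ⟨ex, heq, hmem⟩ := ih S d
      refine ⟨ex, ?_, ?_⟩
      · simp only [List.foldl_cons, rcSweepA, if_neg hc, heq]
      · intro a ha; exact ⟨by simp [(hmem a ha).1], (hmem a ha).2⟩

-- A's 'while not done' loop
def rcLoopA (G : List (String × List String)) (S : PySem.Set String) : PySem.Set String :=
  match h : G.foldl rcSweepA (S, true) with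
  | (S', true) => S'
  | (S', false) => rcLoopA G S'
termination_by (G.map Prod.fst).countP (fun nt => !(PySem.Set.contains S nt))
decreasing_by
  obtain ⟨ex, heq, hmem⟩ := sweepA_grow G S true
  rw [heq] at h
  injection h with h1 h2
  have hex : ex ≠ [] := by
    intro hnil; rw [hnil] at h2; simp at h2
  obtain ⟨a, ha⟩ := List.exists_mem_of_ne_nil ex hex
  obtain ⟨haG, haS⟩ := hmem a ha
  refine countP_strict _ _ _ ?_ a haG ?_ ?_
  · intro x hx
    simp only [Bool.not_eq_true'] at hx ⊢
    cases hSx : PySem.Set.contains S x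
    · rfl
    · exfalso
      have hxS' : x ∈ S' := h1 ▸ List.mem_append_left ex ((PySem.Set.contains_iff S x).mp hSx)
      have := (PySem.Set.contains_iff S' x).mpr hxS'
      rw [hx] at this; cases this
  · simp only [Bool.not_eq_false']
    exact (PySem.Set.contains_iff S' a).mpr (h1 ▸ List.mem_append_right S ha)
  · simp only [Bool.not_eq_true']
    cases hSa : PySem.Set.contains S a
    · rfl
    · exact absurd ((PySem.Set.contains_iff S a).mp hSa) haS

-- nt_s.remove(s): s is inserted first and never removed, so remove == discard here;
-- the set is returned sorted (Python sets are unordered; compared as finite sets)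
def reverse_closure (G : List (String × List String)) (s : String) : List String :=
  PySem.List.sorted (PySem.Set.discard (rcLoopA G (PySem.Set.ofList [s])) s) (fun x => x) false

-- ===== PORT B =====
-- radj: reverse unit-rule adjacency, radj.setdefault(subs[0], []).append(nt)
def rcRadj (G : List (String × List String)) : PySem.Dict String (List String) :=
  G.foldl (fun d r =>
    if r.2.length = 1 then d.modify (PySem.List.pyGetD r.2 0 "") [] (· ++ [r.1]) else d)
    PySem.Dict.empty

-- innermost 'if nt not in seen: seen.add(nt); next_frontier.append(nt)'; state = (seen, next_frontier)
def rcVisit (st : PySem.Set String × List String) (nt : String) : PySem.Set String × List String :=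
  if PySem.Set.contains st.1 nt = true then st
  else (PySem.Set.add st.1 nt, st.2 ++ [nt])

-- 'for nt in radj.get(x, []): …'
def rcProcess (radj : PySem.Dict String (List String))
    (st : PySem.Set String × List String) (x : String) : PySem.Set String × List String :=
  (radj.getD x []).foldl rcVisit st

-- the visit fold appends the same fresh elements to seen and to the next frontier
-- (needed by rcBFS's termination and by the proofs below)
theorem rcVisit_grow (L : List String) :
    ∀ (S : PySem.Set String) (acc : List String),
    ∃ new, L.foldl rcVisit (S, acc) = (S ++ new, acc ++ new)
      ∧ (∀ a ∈ new, a ∈ L ∧ a ∉ S) ∧ new.Nodup := by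
  induction L with
  | nil => intro S acc; exact ⟨[], by simp, by simp, List.nodup_nil⟩
  | cons b L ih =>
    intro S acc
    by_cases hb : b ∈ S
    · obtain ⟨new, heq, hmem, hnd⟩ := ih S acc
      have hcb : PySem.Set.contains S b = true := (PySem.Set.contains_iff S b).mpr hb
      have hstep : rcVisit (S, acc) b = (S, acc) := by simp [rcVisit, hb]
      refine ⟨new, by rw [List.foldl_cons, hstep]; exact heq, ?_, hnd⟩
      intro a ha; exact ⟨List.mem_cons_of_mem _ (hmem a ha).1, (hmem a ha).2⟩
    · have hcb : PySem.Set.contains S b = false := by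
        cases hx : PySem.Set.contains S b
        · rfl
        · exact absurd ((PySem.Set.contains_iff S b).mp hx) hb
      obtain ⟨new, heq, hmem, hnd⟩ := ih (S ++ [b]) (acc ++ [b])
      have hstep : rcVisit (S, acc) b = (S ++ [b], acc ++ [b]) := by
        simp [rcVisit, hb]
      refine ⟨b :: new, ?_, ?_, ?_⟩
      · rw [List.foldl_cons, hstep, List.append_cons S b new, List.append_cons acc b new]
        exact heq
      · intro a ha
        rcases List.mem_cons.mp ha with rfl | ha'
        · exact ⟨List.mem_cons_self, hb⟩
        · exact ⟨List.mem_cons_of_mem _ (hmem a ha').1,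
            fun hx => (hmem a ha').2 (List.mem_append_left _ hx)⟩
      · refine List.nodup_cons.mpr ⟨?_, hnd⟩
        intro hbn
        exact (hmem b hbn).2 (List.mem_append_right _ (List.mem_singleton.mpr rfl))

-- one whole BFS sweep over the frontier grows seen and the next frontier in step
theorem rcProcess_grow (radj : PySem.Dict String (List String)) (F : List String) :
    ∀ (S : PySem.Set String) (acc : List String),
    ∃ new, F.foldl (rcProcess radj) (S, acc) = (S ++ new, acc ++ new)
      ∧ (∀ a ∈ new, (∃ x ∈ F, a ∈ radj.getD x []) ∧ a ∉ S) ∧ new.Nodup := by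
  induction F with
  | nil => intro S acc; exact ⟨[], by simp, by simp, List.nodup_nil⟩
  | cons x F ih =>
    intro S acc
    obtain ⟨n1, heq1, hmem1, hnd1⟩ := rcVisit_grow (radj.getD x []) S acc
    obtain ⟨n2, heq2, hmem2, hnd2⟩ := ih (S ++ n1) (acc ++ n1)
    refine ⟨n1 ++ n2, ?_, ?_, ?_⟩
    · simp only [List.foldl_cons, rcProcess, heq1, heq2, List.append_assoc]
    · intro a ha
      rcases List.mem_append.mp ha with h1 | h2
      · exact ⟨⟨x, List.mem_cons_self, (hmem1 a h1).1⟩, (hmem1 a h1).2⟩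
      · obtain ⟨⟨y, hy, hay⟩, haS⟩ := hmem2 a h2
        exact ⟨⟨y, List.mem_cons_of_mem _ hy, hay⟩, fun hx => haS (List.mem_append_left _ hx)⟩
    · refine List.Nodup.append hnd1 hnd2 ?_
      intro a h1 h2
      exact (hmem2 a h2).2 (List.mem_append_right _ h1)

-- every value element of the dict sits in values.flatten (for rcBFS's measure)
theorem mem_getD_flatten (d : PySem.Dict String (List String)) (k a : String)
    (h : a ∈ d.getD k []) : a ∈ d.values.flatten := by
  rw [PySem.Dict.getD_eq_get?_getD] at h
  cases hg : d.get? k with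
  | none => rw [hg] at h; cases h
  | some v =>
    rw [hg] at h
    have hi := PySem.Dict.mem_items_of_get?_eq_some d hg
    have hv : v ∈ d.values := by
      simp only [PySem.Dict.values]
      exact List.mem_map.mpr ⟨(k, v), hi, rfl⟩
    exact List.mem_flatten.mpr ⟨v, hv, h⟩

-- B's 'while frontier' loop
def rcBFS (radj : PySem.Dict String (List String)) (seen : PySem.Set String)
    (frontier : List String) : PySem.Set String :=
  match frontier with
  | [] => seen
  | f :: fs =>
    match h : (f :: fs).foldl (rcProcess radj) (seen, ([] : List String)) with
    | (seen', nf) => rcBFS radj seen' nf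
termination_by ((radj.values.flatten).countP (fun x => !(PySem.Set.contains seen x)), frontier.length)
decreasing_by
  obtain ⟨new, heq, hmem, hnd⟩ := rcProcess_grow radj (f :: fs) seen []
  rw [heq] at h
  injection h with h1 h2
  simp only [List.nil_append] at h2
  by_cases hne : new = []
  · subst hne
    have hs : seen' = seen := by rw [← h1]; simp
    have hn : nf = [] := h2.symm
    subst hs; subst hn
    exact Prod.Lex.right _ (by simp)
  · obtain ⟨a, ha⟩ := List.exists_mem_of_ne_nil new hne
    obtain ⟨⟨x, _, hax⟩, haS⟩ := hmem a ha
    apply Prod.Lex.left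
    refine countP_strict _ _ _ ?_ a (mem_getD_flatten radj x a hax) ?_ ?_
    · intro y hy
      simp only [Bool.not_eq_true'] at hy ⊢
      cases hSy : PySem.Set.contains seen y
      · rfl
      · exfalso
        have hyS' : y ∈ seen' := h1 ▸ List.mem_append_left new ((PySem.Set.contains_iff seen y).mp hSy)
        have := (PySem.Set.contains_iff seen' y).mpr hyS'
        rw [hy] at this; cases this
    · simp only [Bool.not_eq_false']
      exact (PySem.Set.contains_iff seen' a).mpr (h1 ▸ List.mem_append_right seen ha)
    · simp only [Bool.not_eq_true']
      cases hSa : PySem.Set.contains seen a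
      · rfl
      · exact absurd ((PySem.Set.contains_iff seen a).mp hSa) haS

-- seen.remove(s) == discard here (s never removed); returned sorted like port A
def reverse_closure_alt (G : List (String × List String)) (s : String) : List String :=
  PySem.List.sorted (PySem.Set.discard (rcBFS (rcRadj G) (PySem.Set.ofList [s]) [s]) s)
    (fun x => x) false

-- ===== PRECONDITION & SPEC =====
def Spec_reverse_closure (G : List (String × List String)) (s : String) (out : List String) : Prop := out = reverse_closure_alt G s
instance (G : List (String × List String)) (s : String) (out : List String) : Decidable (Spec_reverse_closure G s out) := by unfold Spec_reverse_closure; infer_instance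

-- ===== CLAIM (what is proved, stated in full; the proofs are below) =====
def Claim_equal_reverse_closure : Prop := ∀ (G : List (String × List String)) (s : String), Dom_reverse_closure G s → Spec_reverse_closure G s (reverse_closure G s)

-- ===== LEMMAS AND PROOFS =====

-- nt derives s via unit rules of G (the common specification of both result sets)
inductive RCDeriv (G : List (String × List String)) (s : String) : String → Prop
  | base : RCDeriv G s s
  | step {nt x : String} : (nt, [x]) ∈ G → RCDeriv G s x → RCDeriv G s nt

theorem rc_len1 (l : List String) (h : l.length = 1) : l = [PySem.List.pyGetD l 0 ""] := by
  match l, h with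
  | [a], _ => simp [PySem.List.pyGetD_zero_cons]

-- ---------- A side ----------

theorem rcLoopA_eq_true {G : List (String × List String)} {S S' : PySem.Set String}
    (h : G.foldl rcSweepA (S, true) = (S', true)) : rcLoopA G S = S' := by
  rw [rcLoopA.eq_def]
  split
  next S2 heq => rw [h] at heq; injection heq with h1 _; exact h1.symm
  next S2 heq => rw [h] at heq; injection heq with _ h2; cases h2

theorem rcLoopA_eq_false {G : List (String × List String)} {S S' : PySem.Set String}
    (h : G.foldl rcSweepA (S, true) = (S', false)) : rcLoopA G S = rcLoopA G S' := by
  rw [rcLoopA.eq_def]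
  split
  next S2 heq => rw [h] at heq; injection heq with _ h2; cases h2
  next S2 heq => rw [h] at heq; injection heq with h1 _; rw [h1]

theorem loopA_subset (G : List (String × List String)) :
    ∀ S : PySem.Set String, ∀ y ∈ S, y ∈ rcLoopA G S := by
  intro S
  induction S using rcLoopA.induct (G := G) with
  | case1 S S' h =>
    intro y hy
    obtain ⟨ex, heq, _⟩ := sweepA_grow G S true
    have h1 : S ++ ex = S' := by rw [heq] at h; exact congrArg Prod.fst h
    rw [rcLoopA_eq_true h, ← h1]
    exact List.mem_append_left ex hy
  | case2 S S' h ih =>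
    intro y hy
    obtain ⟨ex, heq, _⟩ := sweepA_grow G S true
    have h1 : S ++ ex = S' := by rw [heq] at h; exact congrArg Prod.fst h
    rw [rcLoopA_eq_false h]
    exact ih y (h1 ▸ List.mem_append_left ex hy)

theorem sweepA_sound (G₀ : List (String × List String)) (s : String) :
    ∀ (G : List (String × List String)), (∀ r ∈ G, r ∈ G₀) →
    ∀ (S : PySem.Set String) (d : Bool), (∀ y ∈ S, RCDeriv G₀ s y) →
    ∀ y ∈ (G.foldl rcSweepA (S, d)).1, RCDeriv G₀ s y := by
  intro G
  induction G with
  | nil => intro _ S d hS y hy; exact hS y hy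
  | cons r G ih =>
    intro hsub S d hS
    rw [List.foldl_cons]
    by_cases hc : r.2.length = 1 ∧ PySem.Set.contains S (PySem.List.pyGetD r.2 0 "") = true
        ∧ PySem.Set.contains S r.1 = false
    · rw [show rcSweepA (S, d) r = (PySem.Set.add S r.1, false) from by
        simp only [rcSweepA, if_pos hc]]
      apply ih (fun r' hr' => hsub r' (List.mem_cons_of_mem _ hr'))
      intro y hy
      rcases (PySem.Set.mem_add _ _ _).mp hy with hyS | rfl
      · exact hS y hyS
      · have hx : r.2 = [PySem.List.pyGetD r.2 0 ""] := rc_len1 _ hc.1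
        have hrule : (r.1, [PySem.List.pyGetD r.2 0 ""]) ∈ G₀ := by
          have hr := hsub r List.mem_cons_self
          rwa [show r = (r.1, [PySem.List.pyGetD r.2 0 ""]) from by rw [← hx]] at hr
        exact RCDeriv.step hrule (hS _ ((PySem.Set.contains_iff _ _).mp hc.2.1))
    · rw [show rcSweepA (S, d) r = (S, d) from by simp only [rcSweepA, if_neg hc]]
      exact ih (fun r' hr' => hsub r' (List.mem_cons_of_mem _ hr')) S d hS

theorem loopA_sound (G : List (String × List String)) (s : String) :
    ∀ S : PySem.Set String, (∀ y ∈ S, RCDeriv G s y) →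
    ∀ y ∈ rcLoopA G S, RCDeriv G s y := by
  intro S
  induction S using rcLoopA.induct (G := G) with
  | case1 S S' h =>
    intro hS y hy
    rw [rcLoopA_eq_true h] at hy
    exact sweepA_sound G s G (fun r hr => hr) S true hS y (by rw [h]; exact hy)
  | case2 S S' h ih =>
    intro hS y hy
    rw [rcLoopA_eq_false h] at hy
    exact ih (fun z hz => sweepA_sound G s G (fun r hr => hr) S true hS z (by rw [h]; exact hz)) y hy

theorem sweepA_fixed (G : List (String × List String)) :
    ∀ (S : PySem.Set String) (d dd : Bool), G.foldl rcSweepA (S, d) = (S, dd) →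
    ∀ r ∈ G, ¬(r.2.length = 1 ∧ PySem.Set.contains S (PySem.List.pyGetD r.2 0 "") = true
        ∧ PySem.Set.contains S r.1 = false) := by
  induction G with
  | nil => intro S d dd _ r hr; cases hr
  | cons r G ih =>
    intro S d dd h r' hr'
    rw [List.foldl_cons] at h
    by_cases hc : r.2.length = 1 ∧ PySem.Set.contains S (PySem.List.pyGetD r.2 0 "") = true
        ∧ PySem.Set.contains S r.1 = false
    · exfalso
      rw [show rcSweepA (S, d) r = (PySem.Set.add S r.1, false) from by
        simp only [rcSweepA, if_pos hc]] at h
      have hnm : r.1 ∉ S := by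
        intro hm
        have := (PySem.Set.contains_iff S r.1).mpr hm
        rw [hc.2.2] at this; cases this
      obtain ⟨ex, heq, _⟩ := sweepA_grow G (PySem.Set.add S r.1) false
      rw [heq] at h
      have h1 : PySem.Set.add S r.1 ++ ex = S := congrArg Prod.fst h
      rw [PySem.Set.add_of_not_mem hnm] at h1
      have hlen := congrArg List.length h1
      simp [List.length_append] at hlen
    · rw [show rcSweepA (S, d) r = (S, d) from by simp only [rcSweepA, if_neg hc]] at h
      rcases List.mem_cons.mp hr' with rfl | hr''
      · exact hc
      · exact ih S d dd h r' hr'' 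

theorem loopA_closed (G : List (String × List String)) :
    ∀ S : PySem.Set String, ∀ nt x : String, (nt, [x]) ∈ G →
    x ∈ rcLoopA G S → nt ∈ rcLoopA G S := by
  intro S
  induction S using rcLoopA.induct (G := G) with
  | case1 S S' h =>
    intro nt x hrule hx
    obtain ⟨ex, heq, _⟩ := sweepA_grow G S true
    have h' := h
    rw [heq] at h'
    have hex : ex = [] := by simpa using congrArg Prod.snd h'
    subst hex
    have hS' : S' = S := by simpa using (congrArg Prod.fst h').symm
    subst hS'
    rw [rcLoopA_eq_true h] at hx ⊢
    have hfix := sweepA_fixed G S' true true h (nt, [x]) hrule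
    by_cases hnt : nt ∈ S'
    · exact hnt
    · exfalso
      apply hfix
      refine ⟨by simp, ?_, ?_⟩
      · have hg : PySem.List.pyGetD ([x] : List String) 0 "" = x := by
          simp [PySem.List.pyGetD_zero_cons]
        rw [show ((nt, [x]) : String × List String).2 = [x] from rfl, hg]
        exact (PySem.Set.contains_iff S' x).mpr hx
      · cases hcn : PySem.Set.contains S' nt
        · rfl
        · exact absurd ((PySem.Set.contains_iff S' nt).mp hcn) hnt
  | case2 S S' h ih =>
    intro nt x hrule hx
    rw [rcLoopA_eq_false h] at hx ⊢
    exact ih nt x hrule hx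

theorem sweepA_nodup (G : List (String × List String)) :
    ∀ (S : PySem.Set String) (d : Bool), S.Nodup → ((G.foldl rcSweepA (S, d)).1).Nodup := by
  induction G with
  | nil => intro S _ h; exact h
  | cons r G ih =>
    intro S d h
    rw [List.foldl_cons]
    by_cases hc : r.2.length = 1 ∧ PySem.Set.contains S (PySem.List.pyGetD r.2 0 "") = true
        ∧ PySem.Set.contains S r.1 = false
    · rw [show rcSweepA (S, d) r = (PySem.Set.add S r.1, false) from by
        simp only [rcSweepA, if_pos hc]]
      exact ih _ _ (PySem.Set.nodup_add _ _ h)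
    · rw [show rcSweepA (S, d) r = (S, d) from by simp only [rcSweepA, if_neg hc]]
      exact ih S d h

theorem loopA_nodup (G : List (String × List String)) :
    ∀ S : PySem.Set String, S.Nodup → (rcLoopA G S).Nodup := by
  intro S
  induction S using rcLoopA.induct (G := G) with
  | case1 S S' h =>
    intro hnd
    rw [rcLoopA_eq_true h]
    have := sweepA_nodup G S true hnd
    rw [h] at this
    exact this
  | case2 S S' h ih =>
    intro hnd
    rw [rcLoopA_eq_false h]
    apply ih
    have := sweepA_nodup G S true hnd
    rw [h] at this
    exact this

theorem mem_loopA (G : List (String × List String)) (s y : String) :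
    y ∈ rcLoopA G (PySem.Set.ofList [s]) ↔ RCDeriv G s y := by
  constructor
  · intro h
    refine loopA_sound G s _ ?_ y h
    intro z hz
    have hzs : z = s := by simpa using (PySem.Set.mem_ofList _ _).mp hz
    exact hzs ▸ RCDeriv.base
  · intro h
    induction h with
    | base => exact loopA_subset G _ s ((PySem.Set.mem_ofList _ _).mpr (by simp))
    | step hrule _ ih => exact loopA_closed G _ _ _ hrule ih

-- ---------- B side ----------

theorem radj_getD (G : List (String × List String)) (x : String) :
    ∀ d : PySem.Dict String (List String),
    (G.foldl (fun d r =>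
      if r.2.length = 1 then d.modify (PySem.List.pyGetD r.2 0 "") [] (· ++ [r.1]) else d) d).getD x []
    = d.getD x [] ++ G.filterMap (fun r => if r.2 = [x] then some r.1 else none) := by
  induction G with
  | nil => intro d; simp
  | cons r G ih =>
    intro d
    rw [List.foldl_cons]
    by_cases h1 : r.2.length = 1
    · have hr2 : r.2 = [PySem.List.pyGetD r.2 0 ""] := rc_len1 _ h1
      by_cases h2 : PySem.List.pyGetD r.2 0 "" = x
      · have hx : r.2 = [x] := by rw [hr2, h2]
        rw [if_pos h1, h2, ih, PySem.Dict.getD_modify_self]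
        simp only [List.filterMap_cons, hx]
        rw [List.append_assoc]
        rfl
      · have hne : r.2 ≠ [x] := by
          intro hh
          apply h2
          rw [hh]
          simp [PySem.List.pyGetD_zero_cons]
        rw [if_pos h1, ih, PySem.Dict.getD_modify_of_ne]
        · simp only [List.filterMap_cons, if_neg hne]
        · exact fun hh => h2 hh.symm
    · have hne : r.2 ≠ [x] := by
        intro hh
        apply h1
        rw [hh]
        rfl
      rw [if_neg h1, ih]
      simp only [List.filterMap_cons, if_neg hne]

theorem mem_radj (G : List (String × List String)) (x nt : String) :
    nt ∈ (rcRadj G).getD x [] ↔ (nt, [x]) ∈ G := by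
  unfold rcRadj
  rw [radj_getD]
  rw [show (PySem.Dict.empty : PySem.Dict String (List String)).getD x [] = [] from rfl,
    List.nil_append]
  constructor
  · intro h
    obtain ⟨r, hrG, hfr⟩ := List.mem_filterMap.mp h
    by_cases hcond : r.2 = [x]
    · rw [if_pos hcond] at hfr
      injection hfr with hfr
      have : r = (nt, [x]) := by
        obtain ⟨a, b⟩ := r
        simp only at hfr hcond
        rw [hfr, hcond]
      exact this ▸ hrG
    · rw [if_neg hcond] at hfr
      cases hfr
  · intro h
    exact List.mem_filterMap.mpr ⟨(nt, [x]), h, by simp⟩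

theorem rcBFS_nil (radj : PySem.Dict String (List String)) (seen : PySem.Set String) :
    rcBFS radj seen [] = seen := by
  rw [rcBFS]

theorem rcBFS_cons {radj : PySem.Dict String (List String)} {seen seen' : PySem.Set String}
    {f : String} {fs nf : List String}
    (h : (f :: fs).foldl (rcProcess radj) (seen, []) = (seen', nf)) :
    rcBFS radj seen (f :: fs) = rcBFS radj seen' nf := by
  rw [rcBFS]
  split
  next heq => rw [h] at heq; injection heq with h1 h2; rw [h1, h2]

theorem bfs_subset (radj : PySem.Dict String (List String)) :
    ∀ (seen : PySem.Set String) (frontier : List String),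
    ∀ y ∈ seen, y ∈ rcBFS radj seen frontier := by
  intro seen frontier
  induction seen, frontier using rcBFS.induct (radj := radj) with
  | case1 seen =>
    intro y hy
    rw [rcBFS_nil]
    exact hy
  | case2 seen f fs seen' nf h ih =>
    intro y hy
    rw [rcBFS_cons h]
    obtain ⟨new, heq, _, _⟩ := rcProcess_grow radj (f :: fs) seen []
    rw [heq] at h
    have h1 : seen ++ new = seen' := congrArg Prod.fst h
    exact ih y (h1 ▸ List.mem_append_left new hy)

theorem rcVisit_cover (L : List String) :
    ∀ (S : PySem.Set String) (acc : List String), ∀ a ∈ L, a ∈ (L.foldl rcVisit (S, acc)).1 := by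
  induction L with
  | nil => intro S acc a ha; cases ha
  | cons b L ih =>
    intro S acc a ha
    rw [List.foldl_cons]
    rcases List.mem_cons.mp ha with rfl | ha'
    · have hb : a ∈ (rcVisit (S, acc) a).1 := by
        by_cases hm : a ∈ S
        · simp [rcVisit, hm]
        · have hcb : PySem.Set.contains S a = false := by
            cases hx : PySem.Set.contains S a
            · rfl
            · exact absurd ((PySem.Set.contains_iff S a).mp hx) hm
          simp [rcVisit, hm]
      obtain ⟨new, heq, _, _⟩ := rcVisit_grow L (rcVisit (S, acc) a).1 (rcVisit (S, acc) a).2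
      rw [Prod.mk.eta] at heq
      rw [heq]
      exact List.mem_append_left _ hb
    · have := ih (rcVisit (S, acc) b).1 (rcVisit (S, acc) b).2 a ha'
      rwa [Prod.mk.eta] at this

theorem rcProcess_cover (radj : PySem.Dict String (List String)) (F : List String) :
    ∀ (S : PySem.Set String) (acc : List String),
    ∀ x ∈ F, ∀ a ∈ radj.getD x [], a ∈ (F.foldl (rcProcess radj) (S, acc)).1 := by
  induction F with
  | nil => intro S acc x hx; cases hx
  | cons x' F ih =>
    intro S acc x hx a hax
    rw [List.foldl_cons]
    rcases List.mem_cons.mp hx with rfl | hx'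
    · have h1 : a ∈ (rcProcess radj (S, acc) x).1 := rcVisit_cover (radj.getD x []) S acc a hax
      obtain ⟨new, heq, _, _⟩ :=
        rcProcess_grow radj F (rcProcess radj (S, acc) x).1 (rcProcess radj (S, acc) x).2
      rw [Prod.mk.eta] at heq
      rw [heq]
      exact List.mem_append_left _ h1
    · have := ih (rcProcess radj (S, acc) x').1 (rcProcess radj (S, acc) x').2 x hx' a hax
      rwa [Prod.mk.eta] at this

theorem bfs_sound (G : List (String × List String)) (s : String)
    (radj : PySem.Dict String (List String))
    (H : ∀ a x : String, a ∈ radj.getD x [] → (a, [x]) ∈ G) :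
    ∀ (seen : PySem.Set String) (frontier : List String),
    (∀ y ∈ seen, RCDeriv G s y) → (∀ x ∈ frontier, x ∈ seen) →
    ∀ y ∈ rcBFS radj seen frontier, RCDeriv G s y := by
  intro seen frontier
  induction seen, frontier using rcBFS.induct (radj := radj) with
  | case1 seen =>
    intro hS _ y hy
    rw [rcBFS_nil] at hy
    exact hS y hy
  | case2 seen f fs seen' nf h ih =>
    intro hS hF y hy
    rw [rcBFS_cons h] at hy
    obtain ⟨new, heq, hmem, _⟩ := rcProcess_grow radj (f :: fs) seen []
    rw [heq] at h
    have h1 : seen ++ new = seen' := congrArg Prod.fst h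
    have h2 : new = nf := by simpa using congrArg Prod.snd h
    refine ih ?_ ?_ y hy
    · intro z hz
      rw [← h1] at hz
      rcases List.mem_append.mp hz with hz1 | hz2
      · exact hS z hz1
      · obtain ⟨⟨x, hxF, hzx⟩, _⟩ := hmem z hz2
        exact RCDeriv.step (H z x hzx) (hS x (hF x hxF))
    · intro x hx
      rw [← h2] at hx
      exact h1 ▸ List.mem_append_right seen hx

theorem bfs_closed (G : List (String × List String))
    (radj : PySem.Dict String (List String))
    (H' : ∀ nt x : String, (nt, [x]) ∈ G → nt ∈ radj.getD x []) :
    ∀ (seen : PySem.Set String) (frontier : List String),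
    (∀ nt x : String, (nt, [x]) ∈ G → x ∈ seen → nt ∈ seen ∨ x ∈ frontier) →
    ∀ nt x : String, (nt, [x]) ∈ G →
    x ∈ rcBFS radj seen frontier → nt ∈ rcBFS radj seen frontier := by
  intro seen frontier
  induction seen, frontier using rcBFS.induct (radj := radj) with
  | case1 seen =>
    intro hinv nt x hrule hx
    rw [rcBFS_nil] at hx ⊢
    rcases hinv nt x hrule hx with hin | hfr
    · exact hin
    · cases hfr
  | case2 seen f fs seen' nf h ih =>
    intro hinv nt x hrule hx
    rw [rcBFS_cons h] at hx ⊢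
    obtain ⟨new, heq, _, _⟩ := rcProcess_grow radj (f :: fs) seen []
    have h' := h
    rw [heq] at h'
    have h1 : seen ++ new = seen' := congrArg Prod.fst h'
    have h2 : new = nf := by simpa using congrArg Prod.snd h'
    refine ih ?_ nt x hrule hx
    intro nt' x' hrule' hx'
    rw [← h1] at hx'
    rcases List.mem_append.mp hx' with hx1 | hx2
    · rcases hinv nt' x' hrule' hx1 with hin | hfr
      · exact Or.inl (h1 ▸ List.mem_append_left new hin)
      · left
        have hc := rcProcess_cover radj (f :: fs) seen [] x' hfr nt' (H' nt' x' hrule')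
        rw [h] at hc
        exact hc
    · exact Or.inr (h2 ▸ hx2)

theorem bfs_nodup (radj : PySem.Dict String (List String)) :
    ∀ (seen : PySem.Set String) (frontier : List String),
    seen.Nodup → (rcBFS radj seen frontier).Nodup := by
  intro seen frontier
  induction seen, frontier using rcBFS.induct (radj := radj) with
  | case1 seen =>
    intro hnd
    rw [rcBFS_nil]
    exact hnd
  | case2 seen f fs seen' nf h ih =>
    intro hnd
    rw [rcBFS_cons h]
    obtain ⟨new, heq, hmem, hndn⟩ := rcProcess_grow radj (f :: fs) seen []
    rw [heq] at h
    have h1 : seen ++ new = seen' := congrArg Prod.fst h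
    apply ih
    rw [← h1]
    exact List.Nodup.append hnd hndn (fun a ha hb => (hmem a hb).2 ha)

theorem mem_rcBFS (G : List (String × List String)) (s y : String) :
    y ∈ rcBFS (rcRadj G) (PySem.Set.ofList [s]) [s] ↔ RCDeriv G s y := by
  constructor
  · intro h
    refine bfs_sound G s (rcRadj G) (fun a x hax => (mem_radj G x a).mp hax) _ _ ?_ ?_ y h
    · intro z hz
      have hzs : z = s := by simpa using (PySem.Set.mem_ofList _ _).mp hz
      exact hzs ▸ RCDeriv.base
    · intro x hx
      have hxs : x = s := List.mem_singleton.mp hx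
      subst hxs
      exact (PySem.Set.mem_ofList _ _).mpr (by simp)
  · intro h
    induction h with
    | base => exact bfs_subset _ _ _ s ((PySem.Set.mem_ofList _ _).mpr (by simp))
    | step hrule _ ih =>
      refine bfs_closed G (rcRadj G) (fun nt x hr => (mem_radj G x nt).mpr hr) _ _ ?_ _ _ hrule ih
      intro nt' x' _ hx'
      right
      have hxs : x' = s := by simpa using (PySem.Set.mem_ofList _ _).mp hx'
      simp [hxs]

-- ===== VERDICT (by name: the statement is the Claim_ definition above) =====
theorem reverse_closure_spec : Claim_equal_reverse_closure := by
  intro G s _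
  unfold Spec_reverse_closure reverse_closure reverse_closure_alt
  apply PySem.List.sorted_eq_sorted_of_perm _ _ _ (fun a b h => h)
  apply (List.perm_ext_iff_of_nodup
    (PySem.Set.nodup_discard _ _ (loopA_nodup G _ (PySem.Set.nodup_ofList [s])))
    (PySem.Set.nodup_discard _ _ (bfs_nodup _ _ _ (PySem.Set.nodup_ofList [s])))).mpr
  intro y
  simp only [PySem.Set.mem_discard]
  exact and_congr_left (fun _ => (mem_loopA G s y).trans (mem_rcBFS G s y).symm)
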